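-- pv_equiv track=rewrite | github.com/stephane1109/symbolicoperateurs | fcts_utils.py | parse_iramuteq
-- ===== SOURCE A (Python) =====
-- from typing import Dict, List
--
-- def parse_iramuteq(content: str) -> List[Dict[str, str]]:
--     """## Parser un fichier IRaMuTeQ
--
--     - **Objectif** : transformer le contenu brut d'un fichier IRaMuTeQ en liste de
--       dictionnaires exploitables par Pandas.
--     - **Paramètres** :
--       - `content` : texte complet du fichier importé.
--     - **Retour** : liste de dictionnaires contenant l'en-tête (`entete`), le texte
--       associé (`texte`) et les variables/modèles détectés.
--     """
--
--     lines = content.splitlines()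
--     records: List[Dict[str, str]] = []
--     index = 0
--
--     while index < len(lines):
--         line = lines[index].strip()
--
--         if line.startswith("****"):
--             tokens = line[4:].strip().split()
--             variables: Dict[str, str] = {}
--
--             for token in tokens:
--                 if token.startswith("*") and "_" in token:
--                     name, modality = token[1:].split("_", maxsplit=1)
--                     variables[name.strip()] = modality.strip()
--
--             index += 1
--             text_lines: List[str] = []
--
--             while index < len(lines) and not lines[index].strip().startswith("****"):
--                 text_lines.append(lines[index])
--                 index += 1
--
--             records.append(
--                 {
--                     **variables,
--                     "entete": line,
--                     "texte": "\n".join(text_lines).strip(),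
--                 }
--             )
--         else:
--             index += 1
--
--     return records
-- ===== SOURCE B (Python) =====
-- def parse_iramuteq(content):
--     """Single backward pass: walk the lines from the end, accumulating pending
--     text lines; each header line flushes them into one record. Records come out
--     newest-first and are reversed at the end."""
--     lines = content.splitlines()
--     records = []
--     pending = []
--     for raw in reversed(lines):
--         header = raw.strip()
--         if header.startswith("****"):
--             variables = {}
--             for token in header[4:].strip().split():
--                 if token.startswith("*") and "_" in token:
--                     name, modality = token[1:].split("_", 1)
--                     variables[name.strip()] = modality.strip()
--             records.append({**variables, "entete": header, "texte": "\n".join(pending).strip()})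
--             pending = []
--         else:
--             pending.insert(0, raw)
--     records.reverse()
--     return records
-- ===== Notes on version B (the rewrite author's own statement) =====
-- stated objective: alternative
-- what changed: A's forward index-driven while loop with a nested inner while that collects each record's text lines is replaced by a single backward pass over the lines that accumulates pending text lines and flushes them into a record at each header, reversing the record list at the end.
import Mathlib
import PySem

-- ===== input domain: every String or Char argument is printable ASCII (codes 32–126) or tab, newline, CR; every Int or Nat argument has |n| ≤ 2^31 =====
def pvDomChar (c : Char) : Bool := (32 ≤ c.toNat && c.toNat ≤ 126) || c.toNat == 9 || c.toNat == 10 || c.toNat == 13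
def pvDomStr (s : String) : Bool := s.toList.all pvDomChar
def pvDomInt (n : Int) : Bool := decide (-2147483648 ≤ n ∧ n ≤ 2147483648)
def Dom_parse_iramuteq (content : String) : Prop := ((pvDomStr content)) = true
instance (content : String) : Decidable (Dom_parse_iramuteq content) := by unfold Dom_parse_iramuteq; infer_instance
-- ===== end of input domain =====

-- B replaces A's index-driven forward loop (with its nested text-collecting inner
-- while) by a single backward pass that accumulates pending text lines and flushes
-- them at each header; objective: alternative decomposition, same cost.

-- ===== PORT A =====
-- shared header-line processing: both Pythons contain this identical token loop
-- and record construction, transliterated once.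
def pvVars (tokens : List String) : PySem.Dict String String :=
  tokens.foldl (fun varsd token =>
    if PySem.Str.startswith token "*" && PySem.Str.isIn "_" token then
      match PySem.Str.splitMax? (PySem.Str.slice token (some 1) none) "_" 1 with
      | some [name, modality] =>
          varsd.insert (PySem.Str.strip name) (PySem.Str.strip modality)
      | _ => varsd  -- unreachable: "_" ∈ token gives exactly two parts
    else varsd) PySem.Dict.empty

def pvRecord (line : String) (text_lines : List String) : List (String × String) :=
  (((pvVars (PySem.Str.split₀ (PySem.Str.strip (PySem.Str.slice line (some 4) none)))).insert
      "entete" line).insert "texte" (PySem.Str.strip (PySem.Str.join "\n" text_lines))).items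

def pvHdr (l : String) : Bool := PySem.Str.startswith (PySem.Str.strip l) "****"

-- A's inner while: collect text lines until the next header, return (text_lines, rest)
def pvCollectA : List String → List String × List String
  | [] => ([], [])
  | l :: rest =>
      if pvHdr l then ([], l :: rest)
      else ((pvCollectA rest).1.cons l, (pvCollectA rest).2)

-- needed by pvLoopA's termination proof
theorem pvCollectA_snd_length_le (xs : List String) : (pvCollectA xs).2.length ≤ xs.length := by
  induction xs with
  | nil => simp [pvCollectA]
  | cons l rest ih =>
      simp only [pvCollectA]
      split
      · simp
      · simpa using Nat.le_succ_of_le ih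

-- A's outer while over the remaining lines
def pvLoopA : List String → List (List (String × String))
  | [] => []
  | l :: rest =>
      let line := PySem.Str.strip l
      if PySem.Str.startswith line "****" then
        pvRecord line (pvCollectA rest).1 :: pvLoopA (pvCollectA rest).2
      else pvLoopA rest
termination_by xs => xs.length
decreasing_by
  · exact Nat.lt_succ_of_le (pvCollectA_snd_length_le rest)
  · simp

def parse_iramuteq (content : String) : List (List (String × String)) :=
  pvLoopA (PySem.Str.splitlines content)

-- ===== PORT B =====
-- one step of B's backward pass: state = (records so far, pending text lines)
def pvStepB (st : List (List (String × String)) × List String) (raw : String) :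
    List (List (String × String)) × List String :=
  let header := PySem.Str.strip raw
  if PySem.Str.startswith header "****" then
    (st.1 ++ [pvRecord header st.2], [])
  else (st.1, raw :: st.2)

def parse_iramuteq_alt (content : String) : List (List (String × String)) :=
  (((PySem.Str.splitlines content).reverse.foldl pvStepB ([], [])).1).reverse

-- ===== PRECONDITION & SPEC =====
def Spec_parse_iramuteq (content : String) (out : List (List (String × String))) : Prop := out = parse_iramuteq_alt content
instance (content : String) (out : List (List (String × String))) : Decidable (Spec_parse_iramuteq content out) := by unfold Spec_parse_iramuteq; infer_instance

-- ===== CLAIM (what is proved, stated in full; the proofs are below) =====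
def Claim_equal_parse_iramuteq : Prop := ∀ (content : String), Dom_parse_iramuteq content → Spec_parse_iramuteq content (parse_iramuteq content)

-- ===== LEMMAS AND PROOFS =====

theorem pvLoopA_cons (l : String) (rest : List String) :
    pvLoopA (l :: rest) =
      if PySem.Str.startswith (PySem.Str.strip l) "****" then
        pvRecord (PySem.Str.strip l) (pvCollectA rest).1 :: pvLoopA (pvCollectA rest).2
      else pvLoopA rest := by
  rw [pvLoopA]

theorem pvCollectA_eq (xs : List String) :
    pvCollectA xs = (xs.takeWhile (fun l => !pvHdr l), xs.dropWhile (fun l => !pvHdr l)) := by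
  induction xs with
  | nil => simp [pvCollectA]
  | cons l rest ih =>
      by_cases h : pvHdr l
      · simp [pvCollectA, h]
      · simp [pvCollectA, h, ih]

-- A skips the text lines before the first header one by one
theorem pvLoopA_dropWhile (xs : List String) :
    pvLoopA (xs.dropWhile (fun l => !pvHdr l)) = pvLoopA xs := by
  induction xs with
  | nil => simp
  | cons l rest ih =>
      by_cases h : pvHdr l
      · simp [h]
      · have h' : PySem.Chars.startswith (PySem.Chars.strip l.toList) ['*','*','*','*'] = false := by
          simpa [pvHdr] using h
        rw [pvLoopA_cons, if_neg (by simp [h']), List.dropWhile_cons]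
        simpa [h] using ih

-- the invariant of B's backward pass, against A's loop
theorem pvFoldB_eq (xs : List String) :
    xs.foldr (fun x st => pvStepB st x) ([], []) =
      ((pvLoopA (xs.dropWhile (fun l => !pvHdr l))).reverse,
        xs.takeWhile (fun l => !pvHdr l)) := by
  induction xs with
  | nil => simp [pvLoopA]
  | cons l rest ih =>
      rw [List.foldr_cons, ih, List.dropWhile_cons, List.takeWhile_cons]
      by_cases h : pvHdr l
      · have h' : PySem.Str.startswith (PySem.Str.strip l) "****" = true := by
          simpa [pvHdr] using h
        have hC : PySem.Chars.startswith (PySem.Chars.strip l.toList) ['*','*','*','*'] = true := by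
          simpa [pvHdr] using h
        simp only [h, Bool.not_true, Bool.false_eq_true, if_false]
        rw [pvLoopA_cons, if_pos h', pvCollectA_eq]
        simp [pvStepB, hC]
      · have h' : PySem.Chars.startswith (PySem.Chars.strip l.toList) ['*','*','*','*'] = false := by
          simpa [pvHdr] using h
        simp [pvStepB, h, h']

-- ===== VERDICT (by name: the statement is the Claim_ definition above) =====
theorem parse_iramuteq_spec : Claim_equal_parse_iramuteq := by
  intro content _
  unfold Spec_parse_iramuteq parse_iramuteq parse_iramuteq_alt
  rw [List.foldl_reverse, pvFoldB_eq, pvLoopA_dropWhile]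
  simp
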